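-- pv_equiv track=rewrite | github.com/alebedev/aoc2024 | day5.py | is_valid_order
-- ===== SOURCE A (Python) =====
-- def is_valid_order(order: list[str], graph: dict[set[int]]) -> bool:
--     for (i,item) in enumerate(order):
--         rest = order[i+1:]
--         for x in rest:
--             if x not in graph:
--                 continue
--             if item in graph[x]:
--                 return False
--     return True
-- ===== SOURCE B (Python) =====
-- def is_valid_order(order: list[str], graph: dict) -> bool:
--     # Single forward pass: an ordering is invalid iff some earlier item
--     # appears in the rule-set of a later item; check each item's rules
--     # against the set of items already seen.
--     seen = set()
--     for x in order:
--         if any(y in seen for y in graph.get(x, ())):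
--             return False
--         seen.add(x)
--     return True
-- ===== Notes on version B (the rewrite author's own statement) =====
-- stated objective: alternative
-- what changed: Replaced the nested item-vs-suffix scan (each element checked against every later element via repeated slicing) by a single forward pass keeping a seen-set and checking each item's rule list against it.
import Mathlib
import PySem

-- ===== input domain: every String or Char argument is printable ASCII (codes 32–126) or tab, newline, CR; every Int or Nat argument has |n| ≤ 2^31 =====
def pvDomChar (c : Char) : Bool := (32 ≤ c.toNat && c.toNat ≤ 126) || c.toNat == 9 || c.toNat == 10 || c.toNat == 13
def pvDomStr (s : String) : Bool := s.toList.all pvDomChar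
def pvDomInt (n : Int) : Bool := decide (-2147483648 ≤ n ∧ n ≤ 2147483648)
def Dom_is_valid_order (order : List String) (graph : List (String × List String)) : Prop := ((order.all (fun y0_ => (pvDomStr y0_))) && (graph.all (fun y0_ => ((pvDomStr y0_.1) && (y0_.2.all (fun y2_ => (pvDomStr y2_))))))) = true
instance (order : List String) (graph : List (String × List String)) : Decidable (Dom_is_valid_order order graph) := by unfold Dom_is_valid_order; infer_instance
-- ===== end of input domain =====

-- B replaces A's nested item-vs-suffix scan by a single forward pass with a seen-set (objective: alternative).

-- dict lookup (first match, the association-list convention), shared dict primitive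
def pvLookup (graph : List (String × List String)) (x : String) : Option (List String) :=
  (graph.find? (fun p => p.1 == x)).map (·.2)

-- ===== PORT A =====
-- inner loop: 'for x in rest: if x not in graph: continue; if item in graph[x]: return False'
def pvAInner (graph : List (String × List String)) (item : String) : List String → Bool
  | [] => false
  | x :: rest =>
    match pvLookup graph x with
    | none => pvAInner graph item rest
    | some s => if s.contains item then true else pvAInner graph item rest

-- outer loop: 'for (i,item) in enumerate(order): rest = order[i+1:]; …'
def pvAOuter (order : List String) (graph : List (String × List String)) : List (Int × String) → Bool
  | [] => true
  | (i, item) :: t =>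
    let rest := PySem.List.slice order (some (i + 1)) none
    if pvAInner graph item rest then false else pvAOuter order graph t

def is_valid_order (order : List String) (graph : List (String × List String)) : Bool :=
  pvAOuter order graph (PySem.List.enumerate order 0)

-- ===== PORT B =====
-- 'for x in order: if any(y in seen for y in graph.get(x, ())): return False; seen.add(x)'
def pvBGo (graph : List (String × List String)) : PySem.Set String → List String → Bool
  | _, [] => true
  | seen, x :: t =>
    if ((pvLookup graph x).getD []).any (fun y => PySem.Set.contains seen y) then false
    else pvBGo graph (PySem.Set.add seen x) t

def is_valid_order_alt (order : List String) (graph : List (String × List String)) : Bool :=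
  pvBGo graph PySem.Set.empty order

-- ===== PRECONDITION & SPEC =====
def Spec_is_valid_order (order : List String) (graph : List (String × List String)) (out : Bool) : Prop := out = is_valid_order_alt order graph
instance (order : List String) (graph : List (String × List String)) (out : Bool) : Decidable (Spec_is_valid_order order graph out) := by unfold Spec_is_valid_order; infer_instance

-- ===== CLAIM (what is proved, stated in full; the proofs are below) =====
def Claim_equal_is_valid_order : Prop := ∀ (order : List String) (graph : List (String × List String)), Dom_is_valid_order order graph → Spec_is_valid_order order graph (is_valid_order order graph)

-- ===== LEMMAS AND PROOFS =====

-- structural recursion form of A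
def pvARec (graph : List (String × List String)) : List String → Bool
  | [] => true
  | item :: rest =>
    if rest.any (fun x => ((pvLookup graph x).getD []).contains item) then false
    else pvARec graph rest

theorem pvAInner_eq (graph : List (String × List String)) (item : String) (rest : List String) :
    pvAInner graph item rest = rest.any (fun x => ((pvLookup graph x).getD []).contains item) := by
  induction rest with
  | nil => rfl
  | cons x t ih =>
    simp only [pvAInner, List.any_cons]
    cases h : pvLookup graph x with
    | none => simp [ih]
    | some s => by_cases hc : s.contains item <;> simp [ih]

theorem pvAOuter_eq (graph : List (String × List String)) (order : List String) :
    ∀ (suf : List String) (s : Nat), suf = order.drop s →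
      pvAOuter order graph (PySem.List.enumerate suf (s : Int)) = pvARec graph suf := by
  intro suf
  induction suf with
  | nil => intro s _; rfl
  | cons item t ih =>
    intro s hs
    rw [PySem.List.enumerate_cons]
    simp only [pvAOuter, pvARec]
    have hdrop : t = order.drop (s + 1) := by
      rw [← List.tail_drop, ← hs]
      rfl
    have hc : ((s : Int) + 1) = ((s + 1 : Nat) : Int) := by push_cast; ring
    have hrest : PySem.List.slice order (some ((s : Int) + 1)) none = t := by
      rw [hc, PySem.List.slice_from_natCast, ← hdrop]
    have htail : pvAOuter order graph (PySem.List.enumerate t ((s : Int) + 1)) = pvARec graph t := by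
      rw [hc]; exact ih (s + 1) hdrop
    rw [hrest, pvAInner_eq, htail]

theorem all_not_eq_not_any {α : Type} (l : List α) (p : α → Bool) :
    l.all (fun a => !p a) = !l.any p := by
  rw [Bool.eq_iff_iff]
  simp [List.all_eq_true]

theorem all_and_eq {α : Type} (l : List α) (p q : α → Bool) :
    l.all (fun a => p a && q a) = (l.all p && l.all q) := by
  rw [Bool.eq_iff_iff]
  simp only [List.all_eq_true, Bool.and_eq_true]
  exact forall₂_and

theorem any_contains_add (l : List String) (seen : PySem.Set String) (x : String) :
    l.any (fun y => PySem.Set.contains (PySem.Set.add seen x) y)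
      = (l.any (fun y => PySem.Set.contains seen y) || l.contains x) := by
  rw [Bool.eq_iff_iff]
  simp only [List.any_eq_true, Bool.or_eq_true, PySem.Set.contains_eq_listContains,
    List.contains_eq_mem, decide_eq_true_iff, PySem.Set.mem_add]
  constructor
  · rintro ⟨y, hy, h | h⟩
    · exact Or.inl ⟨y, hy, h⟩
    · exact Or.inr (h ▸ hy)
  · rintro (⟨y, hy, h⟩ | h)
    · exact ⟨y, hy, Or.inl h⟩
    · exact ⟨x, h, Or.inr rfl⟩

theorem pvBGo_eq (graph : List (String × List String)) (order : List String) :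
    ∀ seen : PySem.Set String,
      pvBGo graph seen order =
        (order.all (fun x => !((pvLookup graph x).getD []).any (fun y => PySem.Set.contains seen y))
          && pvARec graph order) := by
  induction order with
  | nil => intro seen; rfl
  | cons x t ih =>
    intro seen
    simp only [pvBGo, pvARec, List.all_cons]
    by_cases hx : ((pvLookup graph x).getD []).any (fun y => PySem.Set.contains seen y) = true
    · rw [if_pos hx, hx]
      simp
    · have hx' : ((pvLookup graph x).getD []).any (fun y => PySem.Set.contains seen y) = false :=
        Bool.eq_false_iff.mpr hx
      rw [if_neg hx, ih]
      have hcong : t.all (fun z => !((pvLookup graph z).getD []).any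
            (fun y => PySem.Set.contains (PySem.Set.add seen x) y))
          = (t.all (fun z => !((pvLookup graph z).getD []).any (fun y => PySem.Set.contains seen y))
              && !(t.any (fun z => ((pvLookup graph z).getD []).contains x))) := by
        rw [← all_not_eq_not_any, ← all_and_eq]
        have hfun : (fun z => !((pvLookup graph z).getD []).any
              (fun y => PySem.Set.contains (PySem.Set.add seen x) y))
            = (fun z => !((pvLookup graph z).getD []).any (fun y => PySem.Set.contains seen y)
                && !((pvLookup graph z).getD []).contains x) := by
          funext z
          rw [any_contains_add, Bool.not_or]
        rw [hfun]
      rw [hcong, hx']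
      by_cases hC : t.any (fun z => ((pvLookup graph z).getD []).contains x) = true
      · rw [if_pos hC, hC]
        simp
      · have hC' := Bool.eq_false_iff.mpr hC
        rw [if_neg hC, hC']
        cases t.all (fun z => !((pvLookup graph z).getD []).any (fun y => PySem.Set.contains seen y)) <;>
          cases pvARec graph t <;> rfl

-- ===== VERDICT (by name: the statement is the Claim_ definition above) =====
theorem is_valid_order_spec : Claim_equal_is_valid_order := by
  intro order graph _
  unfold Spec_is_valid_order is_valid_order is_valid_order_alt
  rw [pvBGo_eq]
  have h := pvAOuter_eq graph order order 0 (by simp)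
  simp only [Nat.cast_zero] at h
  rw [h]
  have : order.all (fun x => !((pvLookup graph x).getD []).any
      (fun y => PySem.Set.contains PySem.Set.empty y)) = true := by
    simp [PySem.Set.contains_eq_listContains, PySem.Set.empty]
  rw [this, Bool.true_and]
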